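-- pv_equiv track=rewrite | github.com/maxcohen31/Codewars-Solutions | Codewars/Alternate_Square_Sum_7_kyu.py | alternate_sq_sum
-- ===== SOURCE A (Python) =====
-- def alternate_sq_sum(arr: list) -> int:
--     sum_ = 0
--
--     for idx in range(len(arr)):
--         if idx % 2 != 0:
--             sum_ += pow(arr[idx], 2)
--         else:
--             sum_ += arr[idx]
--     return sum_
-- ===== SOURCE B (Python) =====
-- def alternate_sq_sum(arr: list) -> int:
--     total = 0
--     i = 0
--     n = len(arr)
--     while i + 1 < n:
--         total += arr[i] + arr[i + 1] * arr[i + 1]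
--         i += 2
--     if i < n:
--         total += arr[i]
--     return total
-- ===== Notes on version B (the rewrite author's own statement) =====
-- stated objective: alternative
-- what changed: Replaces A's per-index loop with a parity branch by a stride-2 loop that consumes one (even,odd) pair per iteration with no branch in the loop body, plus a final leftover element.
import Mathlib
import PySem

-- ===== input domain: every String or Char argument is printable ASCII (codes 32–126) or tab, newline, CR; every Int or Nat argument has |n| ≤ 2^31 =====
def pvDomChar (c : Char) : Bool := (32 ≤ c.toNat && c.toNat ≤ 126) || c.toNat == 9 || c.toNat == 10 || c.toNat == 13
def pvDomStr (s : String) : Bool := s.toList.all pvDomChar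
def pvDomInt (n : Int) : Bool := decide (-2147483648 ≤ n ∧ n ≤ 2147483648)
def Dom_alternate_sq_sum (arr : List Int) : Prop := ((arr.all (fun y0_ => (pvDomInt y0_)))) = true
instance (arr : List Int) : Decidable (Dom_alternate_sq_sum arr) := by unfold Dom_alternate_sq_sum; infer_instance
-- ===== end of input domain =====

-- B replaces A's per-index loop with a parity branch by a branch-free stride-2 pair loop (alternative decomposition, same cost).

-- ===== PORT A =====
-- for idx in range(len(arr)): if idx % 2 != 0: sum_ += pow(arr[idx],2) else: sum_ += arr[idx]
def alternate_sq_sum (arr : List Int) : Int :=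
  (PySem.List.pyRange 0 arr.length 1).foldl
    (fun sum_ idx =>
      if PySem.Int.mod idx 2 ≠ 0 then sum_ + (PySem.List.pyGetD arr idx 0) ^ 2
      else sum_ + PySem.List.pyGetD arr idx 0) 0

-- ===== PORT B =====
-- the while loop of Source B: consume one (even,odd) pair per step, then a possible leftover element
def alternate_sq_sum_loop : Int → List Int → Int
  | total, [] => total
  | total, [x] => total + x
  | total, x :: y :: rest => alternate_sq_sum_loop (total + x + y * y) rest

def alternate_sq_sum_alt (arr : List Int) : Int :=
  alternate_sq_sum_loop 0 arr

-- ===== PRECONDITION & SPEC =====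
def Spec_alternate_sq_sum (arr : List Int) (out : Int) : Prop := out = alternate_sq_sum_alt arr
instance (arr : List Int) (out : Int) : Decidable (Spec_alternate_sq_sum arr out) := by unfold Spec_alternate_sq_sum; infer_instance

-- ===== CLAIM (what is proved, stated in full; the proofs are below) =====
def Claim_equal_alternate_sq_sum : Prop := ∀ (arr : List Int), Dom_alternate_sq_sum arr → Spec_alternate_sq_sum arr (alternate_sq_sum arr)

-- ===== LEMMAS AND PROOFS =====

-- characterisation of A's indexed loop from index `pre.length` onward, as a structural fold over the suffix
def pvTailSum (parity : Bool) (total : Int) : List Int → Int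
  | [] => total
  | x :: rest => pvTailSum (!parity) (if parity then total + x ^ 2 else total + x) rest

theorem pvGetD_append (pre : List Int) (x : Int) (suf : List Int) :
    PySem.List.pyGetD (pre ++ x :: suf) (pre.length : Int) 0 = x := by
  rw [PySem.List.pyGetD_natCast]
  simp [List.getD_eq_getElem?_getD]

theorem pvA_tail (suf pre : List Int) (total : Int) :
    (PySem.List.pyRange (pre.length : Int) ((pre ++ suf).length : Int) 1).foldl
      (fun sum_ idx =>
        if PySem.Int.mod idx 2 ≠ 0 then sum_ + (PySem.List.pyGetD (pre ++ suf) idx 0) ^ 2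
        else sum_ + PySem.List.pyGetD (pre ++ suf) idx 0) total
      = pvTailSum (decide (pre.length % 2 = 1)) total suf := by
  induction suf generalizing pre total with
  | nil => simp [PySem.List.pyRange_one_eq_nil, pvTailSum]
  | cons x rest ih =>
    rw [PySem.List.pyRange_one_cons (by simp)]
    simp only [List.foldl_cons]
    have hget := pvGetD_append pre x rest
    have h2 : PySem.Int.mod (pre.length : Int) 2 = (pre.length % 2 : Nat) := by
      simp [PySem.Int.mod, Int.fmod_eq_emod]
    have := ih (pre := pre ++ [x])
      (total := if decide (pre.length % 2 = 1) then total + x ^ 2 else total + x)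
    simp only [List.append_assoc, List.singleton_append, List.length_append,
      List.length_singleton] at this
    have hpar : decide ((pre.length + 1) % 2 = 1) = !decide (pre.length % 2 = 1) := by
      rcases Nat.even_or_odd pre.length with h | h <;>
        simp_all [Nat.even_iff, Nat.odd_iff] <;> omega
    rw [hpar] at this
    have hif : (if ((pre.length % 2 : Nat) : Int) ≠ 0 then total + x ^ 2 else total + x)
        = (if decide (pre.length % 2 = 1) = true then total + x ^ 2 else total + x) := by
      split_ifs with h1 h2 <;> simp_all <;> omega
    rw [hget, h2, hif]
    simp only [pvTailSum]
    rw [show ((pre.length : Int) + 1) = ((pre.length + 1 : Nat) : Int) by push_cast; ring,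
        show (((pre ++ x :: rest).length : Nat) : Int) = ((pre.length + (x :: rest).length : Nat) : Int) by simp]
    exact this

theorem pvTail_eq_loop (l : List Int) (total : Int) :
    pvTailSum false total l = alternate_sq_sum_loop total l := by
  fun_induction alternate_sq_sum_loop total l with
  | case1 => rfl
  | case2 => simp [pvTailSum]
  | case3 total x y rest ih =>
    rw [← ih]
    simp only [pvTailSum, Bool.not_false, Bool.not_true]
    congr 1
    all_goals simp
    ring

-- ===== VERDICT (by name: the statement is the Claim_ definition above) =====
theorem alternate_sq_sum_spec : Claim_equal_alternate_sq_sum := by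
  intro arr _
  show _ = _
  have := pvA_tail arr [] 0
  simpa [alternate_sq_sum, alternate_sq_sum_alt, pvTail_eq_loop] using this
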